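-- pv_equiv track=rewrite | github.com/kimdonggyu2008/codetree-TILs | 241019/가장 많은 정수 선택하기 2/pick-the-most-integers-2.py | count
-- ===== SOURCE A (Python) =====
-- def count(numbers,k,n,c):
--     most_diff=0
--     temp_numbers=numbers+numbers[:k-1]
--     for i in range(n):
--         c_diff=0
--         diff=set(temp_numbers[i:i+k])
--         if c not in diff:
--             c_diff=len(diff)+1
--         else:
--             c_diff=len(diff)
--
--         most_diff=max(most_diff,c_diff)
--     return most_diff
-- ===== SOURCE B (Python) =====
-- def count(numbers, k, n, c):
--     if n <= 0:
--         return 0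
--     if k <= 0:
--         return 1
--     temp = numbers + numbers[:k - 1]
--     m = len(temp)
--     freq = {}
--     distinct = 0
--     for x in temp[:k]:
--         if freq.get(x, 0) == 0:
--             distinct += 1
--         freq[x] = freq.get(x, 0) + 1
--     best = 0
--     for i in range(n):
--         cur = distinct + (0 if freq.get(c, 0) > 0 else 1)
--         if cur > best:
--             best = cur
--         if i < m:
--             x = temp[i]
--             freq[x] = freq.get(x, 0) - 1
--             if freq.get(x, 0) == 0:
--                 distinct -= 1
--         if i + k < m:
--             x = temp[i + k]
--             if freq.get(x, 0) == 0:
--                 distinct += 1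
--             freq[x] = freq.get(x, 0) + 1
--     return best
-- ===== Notes on version B (the rewrite author's own statement) =====
-- stated objective: faster
-- what changed: A rebuilds a Python set for every window (O(n*k)); B slides a window once over the padded list, maintaining a frequency dict and an incremental distinct count (O(n+k)).
-- intended difference: For k < 0 (with n > 0 and len(numbers) > -k) when the reachable prefix of numbers contains an element different from c, A's window temp[i:i+k] hits Python's negative-stop wraparound and becomes an accidental suffix slice, so A returns the max distinct-count of those slices (2 at the witness); B treats a non-positive window size as an empty window and returns 1, the intended value (empty selection plus the extra card c). — e.g. on count([1, 2], -1, 1, 0): A returns 2, B returns 1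
import Mathlib
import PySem

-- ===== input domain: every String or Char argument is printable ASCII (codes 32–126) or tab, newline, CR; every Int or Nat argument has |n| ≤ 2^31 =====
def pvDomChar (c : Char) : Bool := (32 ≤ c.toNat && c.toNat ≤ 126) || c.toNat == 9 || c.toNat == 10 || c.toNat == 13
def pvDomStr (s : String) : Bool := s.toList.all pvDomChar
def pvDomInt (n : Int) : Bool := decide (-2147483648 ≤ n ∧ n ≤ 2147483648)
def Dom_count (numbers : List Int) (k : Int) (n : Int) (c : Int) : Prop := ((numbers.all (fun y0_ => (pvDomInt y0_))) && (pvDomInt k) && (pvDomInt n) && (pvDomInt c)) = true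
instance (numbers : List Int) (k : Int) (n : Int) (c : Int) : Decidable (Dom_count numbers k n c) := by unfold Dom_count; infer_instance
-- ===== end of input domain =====

-- B replaces A's per-window set construction by a sliding window with a frequency dict that
-- maintains the distinct count incrementally; for k < 0, where A's windows are accidental
-- negative-stop suffix slices, B treats the window as empty (see D_count below).

-- ===== PORT A =====
def count (numbers : List Int) (k : Int) (n : Int) (c : Int) : Int :=
  let temp := numbers ++ PySem.List.slice numbers none (some (k - 1))
  (PySem.List.pyRange 0 n 1).foldl (fun most_diff i =>
    let diff : PySem.Set Int := PySem.Set.ofList (PySem.List.slice temp (some i) (some (i + k)))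
    let c_diff : Int := if c ∉ diff then (diff.length : Int) + 1 else (diff.length : Int)
    max most_diff c_diff) 0

-- ===== PORT B =====
-- loop body of B's initial window-filling loop ('for x in temp[:k]'); state = (freq, distinct)
def bInit (s : PySem.Dict Int Int × Int) (x : Int) : PySem.Dict Int Int × Int :=
  let dist := if s.1.getD x 0 = 0 then s.2 + 1 else s.2
  (s.1.insert x (s.1.getD x 0 + 1), dist)

-- loop body of B's sliding loop ('for i in range(n)'); state = (freq, distinct, best)
def bStep (temp : List Int) (m k c : Int) (s : PySem.Dict Int Int × Int × Int) (i : Int) :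
    PySem.Dict Int Int × Int × Int :=
  let cur : Int := s.2.1 + (if 0 < s.1.getD c 0 then 0 else 1)
  let best : Int := if s.2.2 < cur then cur else s.2.2
  let s1 : PySem.Dict Int Int × Int :=
    if i < m then
      let x := PySem.List.pyGetD temp i 0
      let f1 := s.1.insert x (s.1.getD x 0 - 1)
      (f1, if f1.getD x 0 = 0 then s.2.1 - 1 else s.2.1)
    else (s.1, s.2.1)
  let s2 : PySem.Dict Int Int × Int :=
    if i + k < m then
      let x := PySem.List.pyGetD temp (i + k) 0
      (s1.1.insert x (s1.1.getD x 0 + 1), if s1.1.getD x 0 = 0 then s1.2 + 1 else s1.2)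
    else s1
  (s2.1, s2.2, best)

def count_alt (numbers : List Int) (k : Int) (n : Int) (c : Int) : Int :=
  if n ≤ 0 then 0
  else if k ≤ 0 then 1
  else
    let temp := numbers ++ PySem.List.slice numbers none (some (k - 1))
    let m : Int := (temp.length : Int)
    let s0 := (PySem.List.slice temp none (some k)).foldl bInit (PySem.Dict.empty, 0)
    let r := (PySem.List.pyRange 0 n 1).foldl (bStep temp m k c) (s0.1, s0.2, 0)
    r.2.2

-- ===== PRECONDITION & SPEC =====
-- For k < 0 (with n > 0 and len(numbers) > -k), A's window temp[i:i+k] hits Python's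
-- negative-stop wraparound and becomes an accidental suffix slice, so A returns the max
-- distinct-count over those accidental slices; B treats a non-positive window size as an
-- empty window and returns 1, the intended value (empty selection plus the extra card c).
def D_count (numbers : List Int) (k : Int) (n : Int) (c : Int) : Prop :=
  0 < min n (-k) ∧ 0 < numbers.length + k ∧
  ∃ x ∈ numbers.take (2 * numbers.length + 2 * k - 2 + min n (-k)).toNat, x ≠ c
instance (numbers : List Int) (k : Int) (n : Int) (c : Int) : Decidable (D_count numbers k n c) := by
  unfold D_count; infer_instance

def Spec_count (numbers : List Int) (k : Int) (n : Int) (c : Int) (out : Int) : Prop :=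
  ¬ D_count numbers k n c → out = count_alt numbers k n c
instance (numbers : List Int) (k : Int) (n : Int) (c : Int) (out : Int) : Decidable (Spec_count numbers k n c out) := by
  unfold Spec_count; infer_instance

def pvDiffWitness_count : List Int × Int × Int × Int := ([1, 2], -1, 1, 0)
def pvDiffWitnessOut_count : Int × Int := (2, 1)

-- ===== CLAIM (what is proved, stated in full; the proofs are below) =====
def Claim_unchanged_count : Prop := ∀ (numbers : List Int) (k : Int) (n : Int) (c : Int), Dom_count numbers k n c → Spec_count numbers k n c (count numbers k n c)
def Claim_changed_count : Prop := Dom_count (pvDiffWitness_count.1) (pvDiffWitness_count.2.1) (pvDiffWitness_count.2.2.1) (pvDiffWitness_count.2.2.2) ∧ D_count (pvDiffWitness_count.1) (pvDiffWitness_count.2.1) (pvDiffWitness_count.2.2.1) (pvDiffWitness_count.2.2.2) ∧ count (pvDiffWitness_count.1) (pvDiffWitness_count.2.1) (pvDiffWitness_count.2.2.1) (pvDiffWitness_count.2.2.2) = pvDiffWitnessOut_count.1 ∧ count_alt (pvDiffWitness_count.1) (pvDiffWitness_count.2.1) (pvDiffWitness_count.2.2.1) (pvDiffWitness_count.2.2.2)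 = pvDiffWitnessOut_count.2 ∧ pvDiffWitnessOut_count.1 ≠ pvDiffWitnessOut_count.2
def Claim_exact_count : Prop := ∀ (numbers : List Int) (k : Int) (n : Int) (c : Int), Dom_count numbers k n c → D_count numbers k n c → count numbers k n c ≠ count_alt numbers k n c

-- ===== LEMMAS AND PROOFS =====

-- the take-bound appearing in D_count, and the padded list, the k-window of it
-- starting at j, and A's per-window value
def pvQ (numbers : List Int) (k n : Int) : Nat :=
  (2 * (numbers.length : Int) + 2 * k - 2 + min n (-k)).toNat
def pvTemp (numbers : List Int) (k : Int) : List Int :=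
  numbers ++ PySem.List.slice numbers none (some (k - 1))
def win (temp : List Int) (K : Nat) (j : Nat) : List Int := (temp.drop j).take K
def fval (temp : List Int) (K : Nat) (c : Int) (j : Nat) : Int :=
  ((PySem.Set.ofList (win temp K j)).length : Int) + (if c ∈ win temp K j then 0 else 1)

lemma pv_ite_max (a b : Int) : (if a < b then b else a) = max a b := by
  rw [max_def]; split_ifs <;> omega

lemma pv_setlen_append (l : List Int) (y : Int) :
    ((PySem.Set.ofList (l ++ [y])).length : Int)
      = ((PySem.Set.ofList l).length : Int) + (if y ∈ l then 0 else 1) := by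
  rw [PySem.Set.ofList_append_singleton]
  by_cases h : y ∈ l
  · rw [PySem.Set.add_of_mem (by rw [PySem.Set.mem_ofList]; exact h)]; simp [h]
  · rw [PySem.Set.add_of_not_mem (by rw [PySem.Set.mem_ofList]; exact h)]; simp [h]

lemma pv_setlen_cons (x : Int) (l : List Int) :
    ((PySem.Set.ofList (x :: l)).length : Int)
      = ((PySem.Set.ofList l).length : Int) + (if x ∈ l then 0 else 1) := by
  by_cases h : x ∈ l
  · have hperm : (PySem.Set.ofList (x :: l)).Perm (PySem.Set.ofList l) := by
      rw [List.perm_ext_iff_of_nodup (PySem.Set.nodup_ofList _) (PySem.Set.nodup_ofList _)]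
      intro y
      rw [PySem.Set.mem_ofList, PySem.Set.mem_ofList, List.mem_cons]
      constructor
      · rintro (rfl | hy); exact h; exact hy
      · exact Or.inr
    rw [hperm.length_eq]; simp [h]
  · have hperm : (PySem.Set.ofList (x :: l)).Perm (x :: PySem.Set.ofList l) := by
      rw [List.perm_ext_iff_of_nodup (PySem.Set.nodup_ofList _)
        (List.nodup_cons.mpr ⟨by rw [PySem.Set.mem_ofList]; exact h, PySem.Set.nodup_ofList _⟩)]
      intro y
      rw [PySem.Set.mem_ofList, List.mem_cons, List.mem_cons, PySem.Set.mem_ofList]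
    rw [hperm.length_eq]; simp [h]

lemma pv_win_nil (temp : List Int) (K : Nat) {j : Nat} (hj : temp.length ≤ j) :
    win temp K j = [] := by
  unfold win
  rw [List.drop_eq_nil_of_le hj, List.take_nil]

lemma pv_win_cons (temp : List Int) {K j : Nat} (hj : j < temp.length) (hK : 1 ≤ K) :
    win temp K j = temp[j] :: win temp (K - 1) (j + 1) := by
  obtain ⟨K', rfl⟩ : ∃ K', K = K' + 1 := ⟨K - 1, by omega⟩
  unfold win
  rw [List.drop_eq_getElem_cons hj, List.take_succ_cons]
  simp

lemma pv_win_snoc (temp : List Int) {K j : Nat} (hK : 1 ≤ K) (h : j + K < temp.length) :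
    win temp K (j + 1) = win temp (K - 1) (j + 1) ++ [temp[j + K]] := by
  obtain ⟨K', rfl⟩ : ∃ K', K = K' + 1 := ⟨K - 1, by omega⟩
  unfold win
  rw [List.take_add_one]
  have e : (List.drop (j + 1) temp)[K']? = some temp[j + (K' + 1)] := by
    rw [List.getElem?_drop]
    have e2 : j + 1 + K' = j + (K' + 1) := by omega
    rw [e2, List.getElem?_eq_getElem (by omega)]
  rw [e]
  simp

lemma pv_win_stable (temp : List Int) {K j : Nat} (hK : 1 ≤ K) (h : temp.length ≤ j + K) :
    win temp K (j + 1) = win temp (K - 1) (j + 1) := by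
  unfold win
  rw [List.take_of_length_le (by simp; omega), List.take_of_length_le (by simp; omega)]

lemma pv_bStep (temp : List Int) (k c : Int) (hk : 1 ≤ k) (j : Nat)
    (freq : PySem.Dict Int Int) (dist best : Int)
    (h1 : ∀ x, freq.getD x 0 = ((win temp k.toNat j).count x : Int))
    (h2 : dist = ((PySem.Set.ofList (win temp k.toNat j)).length : Int)) :
    ∃ freq' dist',
      bStep temp (temp.length : Int) k c (freq, dist, best) (j : Int)
        = (freq', dist', max best (fval temp k.toNat c j)) ∧
      (∀ x, freq'.getD x 0 = ((win temp k.toNat (j + 1)).count x : Int)) ∧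
      dist' = ((PySem.Set.ofList (win temp k.toNat (j + 1))).length : Int) := by
  have hK1 : 1 ≤ k.toNat := by omega
  have hkK : (k.toNat : Int) = k := Int.toNat_of_nonneg (by omega)
  have hcur : dist + (if 0 < freq.getD c 0 then 0 else 1) = fval temp k.toNat c j := by
    rw [h1 c, h2]; unfold fval
    congr 1
    by_cases hc : c ∈ win temp k.toNat j
    · have := List.count_pos_iff.mpr hc
      simp [hc]
    · have : (win temp k.toNat j).count c = 0 := by simpa [List.count_eq_zero] using hc
      simp [hc, this]
  have hbest : (if best < dist + (if 0 < freq.getD c 0 then 0 else 1)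
        then dist + (if 0 < freq.getD c 0 then 0 else 1) else best)
      = max best (fval temp k.toNat c j) := by
    rw [hcur, pv_ite_max]
  -- phase 1: after the removal branch the state tracks mid := win temp (K-1) (j+1)
  by_cases hj : j < temp.length
  · have hj' : (j : Int) < (temp.length : Int) := by exact_mod_cast hj
    have hx : PySem.List.pyGetD temp (j : Int) 0 = temp[j] := by
      rw [PySem.List.pyGetD_natCast, List.getD_eq_getElem _ _ hj]
    have hwj : win temp k.toNat j = temp[j] :: win temp (k.toNat - 1) (j + 1) :=
      pv_win_cons temp hj hK1
    set mid := win temp (k.toNat - 1) (j + 1) with hmiddef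
    set f1 := freq.insert temp[j] (freq.getD temp[j] 0 - 1) with hf1def
    have hf1 : ∀ y, f1.getD y 0 = (mid.count y : Int) := by
      intro y
      rw [hf1def, PySem.Dict.getD_insert]
      by_cases hyx : y = temp[j]
      · subst hyx
        rw [if_pos rfl, h1 _, hwj, List.count_cons_self]
        push_cast; ring
      · rw [if_neg hyx, h1 y, hwj, List.count_cons,
          if_neg (by simpa using fun h => hyx h.symm)]
        simp
    have hd1 : (if f1.getD temp[j] 0 = 0 then dist - 1 else dist)
        = ((PySem.Set.ofList mid).length : Int) := by
      rw [hf1 temp[j], h2, hwj, pv_setlen_cons]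
      by_cases hxm : temp[j] ∈ mid
      · have h0 : mid.count temp[j] ≠ 0 := (List.count_pos_iff.mpr hxm).ne'
        simp [hxm, h0]
      · have h0 : mid.count temp[j] = 0 := by simpa [List.count_eq_zero] using hxm
        simp [hxm, h0]
    -- phase 2
    by_cases hjk : j + k.toNat < temp.length
    · have hjk' : (j : Int) + k < (temp.length : Int) := by
        rw [← hkK]; exact_mod_cast hjk
      have hy : PySem.List.pyGetD temp ((j : Int) + k) 0 = temp[j + k.toNat] := by
        have e : (j : Int) + k = ((j + k.toNat : Nat) : Int) := by push_cast; omega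
        rw [e, PySem.List.pyGetD_natCast, List.getD_eq_getElem _ _ hjk]
      have hwj1 : win temp k.toNat (j + 1) = mid ++ [temp[j + k.toNat]] :=
        pv_win_snoc temp hK1 hjk
      refine ⟨f1.insert temp[j + k.toNat] (f1.getD temp[j + k.toNat] 0 + 1),
        (if f1.getD temp[j + k.toNat] 0 = 0
          then (if f1.getD temp[j] 0 = 0 then dist - 1 else dist) + 1
          else (if f1.getD temp[j] 0 = 0 then dist - 1 else dist)), ?_, ?_, ?_⟩
      · simp only [bStep]
        rw [if_pos hj', if_pos hjk', hbest, hx, hy]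
      · intro z
        rw [PySem.Dict.getD_insert, hwj1]
        by_cases hz : z = temp[j + k.toNat]
        · subst hz
          rw [if_pos rfl, hf1 _, List.count_append, List.count_singleton]
          simp
        · rw [if_neg hz, hf1 z, List.count_append, List.count_singleton,
            if_neg (by simpa using fun h => hz h.symm)]
          simp
      · rw [hd1, hwj1, pv_setlen_append, hf1 _]
        by_cases hym : temp[j + k.toNat] ∈ mid
        · have h0 : mid.count temp[j + k.toNat] ≠ 0 := (List.count_pos_iff.mpr hym).ne'
          simp [hym, h0]
        · have h0 : mid.count temp[j + k.toNat] = 0 := by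
            simpa [List.count_eq_zero] using hym
          simp [hym, h0]
    · have hjk' : ¬ ((j : Int) + k < (temp.length : Int)) := by
        rw [← hkK]; intro hcon; apply hjk; exact_mod_cast hcon
      have hwj1 : win temp k.toNat (j + 1) = mid :=
        pv_win_stable temp hK1 (by omega)
      refine ⟨f1, (if f1.getD temp[j] 0 = 0 then dist - 1 else dist), ?_, ?_, ?_⟩
      · simp only [bStep]
        rw [if_pos hj', if_neg hjk', hbest, hx]
      · intro z; rw [hwj1]; exact hf1 z
      · rw [hwj1]; exact hd1
  · have hj' : ¬ ((j : Int) < (temp.length : Int)) := by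
      intro hcon; apply hj; exact_mod_cast hcon
    have hjk' : ¬ ((j : Int) + k < (temp.length : Int)) := by
      intro hcon; apply hj; have := hkK ▸ hcon; omega
    have hwj : win temp k.toNat j = [] := pv_win_nil temp _ (by omega)
    have hwj1 : win temp k.toNat (j + 1) = [] := pv_win_nil temp _ (by omega)
    refine ⟨freq, dist, ?_, ?_, ?_⟩
    · simp only [bStep]
      rw [if_neg hj', if_neg hjk', hbest]
    · intro z; rw [hwj1]; rw [h1 z, hwj]
    · rw [hwj1]; rw [h2, hwj]

lemma pv_main_loop (temp : List Int) (k c : Int) (hk : 1 ≤ k) :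
    ∀ (t : Nat) (j : Nat) (freq : PySem.Dict Int Int) (dist best : Int),
    (∀ x, freq.getD x 0 = ((win temp k.toNat j).count x : Int)) →
    dist = ((PySem.Set.ofList (win temp k.toNat j)).length : Int) →
    ((PySem.List.pyRange (j : Int) ((j : Int) + (t : Int)) 1).foldl
        (bStep temp (temp.length : Int) k c) (freq, dist, best)).2.2
      = (PySem.List.pyRange (j : Int) ((j : Int) + (t : Int)) 1).foldl
          (fun b i => max b (fval temp k.toNat c i.toNat)) best := by
  intro t
  induction t with
  | zero =>
    intro j freq dist best h1 h2
    rw [PySem.List.pyRange_one_eq_nil (by omega)]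
    rfl
  | succ t ih =>
    intro j freq dist best h1 h2
    have hlt : (j : Int) < (j : Int) + ((t : Nat) + 1 : Nat) := by push_cast; omega
    rw [PySem.List.pyRange_one_cons hlt]
    simp only [List.foldl_cons]
    obtain ⟨freq', dist', hstep, h1', h2'⟩ := pv_bStep temp k c hk j freq dist best h1 h2
    rw [hstep]
    have e3 : fval temp k.toNat c (j : Int).toNat = fval temp k.toNat c j := by simp
    have e1 : (j : Int) + 1 = ((j + 1 : Nat) : Int) := by push_cast; ring
    have e2 : (j : Int) + ((t + 1 : Nat) : Int) = ((j + 1 : Nat) : Int) + (t : Int) := by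
      push_cast; ring
    rw [e3, e2, e1]
    exact ih (j + 1) freq' dist' (max best (fval temp k.toNat c j)) h1' h2'

def bigval (numbers : List Int) (k c : Int) (i : Int) : Int :=
  if c ∉ PySem.Set.ofList (PySem.List.slice (pvTemp numbers k) (some i) (some (i + k)))
    then ((PySem.Set.ofList (PySem.List.slice (pvTemp numbers k) (some i) (some (i + k)))).length : Int) + 1
    else ((PySem.Set.ofList (PySem.List.slice (pvTemp numbers k) (some i) (some (i + k)))).length : Int)

lemma pv_countA_fold (numbers : List Int) (k n c : Int) :
    count numbers k n c
      = (PySem.List.pyRange 0 n 1).foldl (fun most_diff i =>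
          max most_diff (bigval numbers k c i)) 0 := rfl

lemma pv_countA (numbers : List Int) (k n c : Int) (hk : 1 ≤ k) :
    count numbers k n c
      = (PySem.List.pyRange 0 n 1).foldl
          (fun b i => max b (fval (pvTemp numbers k) k.toNat c i.toNat)) 0 := by
  rw [pv_countA_fold]
  apply PySem.List.foldl_congr_mem
  intro acc i hi
  unfold bigval
  have hi0 : 0 ≤ i := (PySem.List.mem_pyRange_one.mp hi).1
  have hslice : PySem.List.slice (pvTemp numbers k) (some i) (some (i + k))
      = win (pvTemp numbers k) k.toNat i.toNat := by
    rw [PySem.List.slice_toNat _ hi0 (by omega)]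
    unfold win
    congr 1
    omega
  rw [hslice]
  unfold fval
  by_cases hc : c ∈ win (pvTemp numbers k) k.toNat i.toNat
  · rw [if_neg (by rw [PySem.Set.mem_ofList]; simpa using hc), if_pos hc]
    ring
  · rw [if_pos (by rw [PySem.Set.mem_ofList]; simpa using hc), if_neg hc]

lemma pv_init_loop (l : List Int) :
    ∀ (acc : List Int) (d : PySem.Dict Int Int) (dist : Int),
    (∀ x, d.getD x 0 = (acc.count x : Int)) →
    dist = ((PySem.Set.ofList acc).length : Int) →
    (∀ x, (l.foldl bInit (d, dist)).1.getD x 0 = ((acc ++ l).count x : Int)) ∧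
    (l.foldl bInit (d, dist)).2 = ((PySem.Set.ofList (acc ++ l)).length : Int) := by
  induction l with
  | nil => intro acc d dist h1 h2; simpa using ⟨h1, h2⟩
  | cons x l ih =>
    intro acc d dist h1 h2
    rw [List.foldl_cons]
    have hstep : bInit (d, dist) x =
        (d.insert x (d.getD x 0 + 1), if d.getD x 0 = 0 then dist + 1 else dist) := rfl
    rw [hstep]
    have h1' : ∀ y, (d.insert x (d.getD x 0 + 1)).getD y 0 = (((acc ++ [x]).count y : Nat) : Int) := by
      intro y
      rw [PySem.Dict.getD_insert]
      by_cases hy : y = x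
      · subst hy; rw [List.count_append, h1 y]; simp
      · rw [if_neg hy, List.count_append, h1 y, List.count_singleton,
          if_neg (by simpa using fun h => hy h.symm)]
        simp
    have h2' : (if d.getD x 0 = 0 then dist + 1 else dist)
        = ((PySem.Set.ofList (acc ++ [x])).length : Int) := by
      rw [pv_setlen_append, ← h2, h1 x]
      by_cases hm : x ∈ acc
      · have h0 : acc.count x ≠ 0 := (List.count_pos_iff.mpr hm).ne'
        simp [hm, h0]
      · have h0 : acc.count x = 0 := by simpa [List.count_eq_zero] using hm
        simp [hm, h0]
    have := ih (acc ++ [x]) _ _ h1' h2'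
    simpa [List.append_assoc] using this

lemma pv_fold_max_aux (l : List Int) :
    ∀ b : Int, l.foldl (fun a (_ : Int) => max a 1) (max b 1) = max b 1 := by
  induction l with
  | nil => intro b; rfl
  | cons x l ih =>
    intro b
    rw [List.foldl_cons, max_assoc, max_self]
    exact ih b

lemma pv_temp_eq_of_neg (numbers : List Int) (k : Int) (hkneg : k < 0)
    (hL : (numbers.length : Int) + k ≤ 0) : pvTemp numbers k = numbers := by
  unfold pvTemp
  have e : k - 1 = -(((1 - k).toNat : Nat) : Int) := by omega
  rw [e, PySem.List.slice_to_neg_natCast numbers _ (by omega)]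
  have e2 : numbers.length - (1 - k).toNat = 0 := by omega
  rw [e2]
  simp

lemma pv_empty_slice (numbers : List Int) (k : Int) (hk0 : k ≤ 0)
    (hL : k < 0 → (numbers.length : Int) + k ≤ 0) (i : Int) (hi : 0 ≤ i) :
    PySem.List.slice (pvTemp numbers k) (some i) (some (i + k)) = [] := by
  apply List.eq_nil_of_length_eq_zero
  rw [PySem.List.length_slice]
  by_cases hk : k = 0
  · subst hk; simp
  · have hkneg : k < 0 := by omega
    rw [pv_temp_eq_of_neg numbers k hkneg (hL hkneg)]
    have hci : PySem.List.clampIdx numbers.length i = min i.toNat numbers.length := by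
      rw [← Int.toNat_of_nonneg hi, PySem.List.clampIdx_natCast]; omega
    by_cases hik : 0 ≤ i + k
    · have hcik : PySem.List.clampIdx numbers.length (i + k)
          = min (i + k).toNat numbers.length := by
        rw [← Int.toNat_of_nonneg hik, PySem.List.clampIdx_natCast]; omega
      rw [hcik, hci]; omega
    · have e : i + k = -((((-(i + k)).toNat : Nat)) : Int) := by omega
      have hcik : PySem.List.clampIdx numbers.length (i + k)
          = numbers.length - (-(i + k)).toNat := by
        conv_lhs => rw [e]
        exact PySem.List.clampIdx_neg_natCast _ _ (by omega)
      rw [hcik, hci]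
      have := hL hkneg
      omega

lemma pv_countA_one (numbers : List Int) (k n c : Int) (hn : 0 < n) (hk0 : k ≤ 0)
    (hL : k < 0 → (numbers.length : Int) + k ≤ 0) : count numbers k n c = 1 := by
  have step : count numbers k n c
      = (PySem.List.pyRange 0 n 1).foldl (fun (a : Int) (_ : Int) => max a 1) 0 := by
    rw [pv_countA_fold]
    apply PySem.List.foldl_congr_mem
    intro acc i hi
    unfold bigval
    have hi0 : 0 ≤ i := (PySem.List.mem_pyRange_one.mp hi).1
    rw [pv_empty_slice numbers k hk0 hL i hi0]
    simp [PySem.Set.ofList]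
  rw [step, PySem.List.pyRange_one_cons hn, List.foldl_cons, pv_fold_max_aux]
  simp

lemma pv_count_eq_main (numbers : List Int) (k n c : Int) (hn : 0 < n) (hk : 1 ≤ k) :
    count numbers k n c = count_alt numbers k n c := by
  rw [pv_countA numbers k n c hk]
  unfold count_alt
  rw [if_neg (by omega), if_neg (by omega)]
  show _ = ((PySem.List.pyRange 0 n 1).foldl
      (bStep (pvTemp numbers k) (((pvTemp numbers k).length : Nat) : Int) k c)
      (((PySem.List.slice (pvTemp numbers k) none (some k)).foldl bInit (PySem.Dict.empty, 0)).1,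
       ((PySem.List.slice (pvTemp numbers k) none (some k)).foldl bInit (PySem.Dict.empty, 0)).2,
       0)).2.2
  have hslice : PySem.List.slice (pvTemp numbers k) none (some k)
      = win (pvTemp numbers k) k.toNat 0 := by
    rw [PySem.List.slice_to _ (by omega)]
    unfold win
    rw [List.drop_zero]
  rw [hslice]
  obtain ⟨hc1, hc2⟩ := pv_init_loop (win (pvTemp numbers k) k.toNat 0) [] PySem.Dict.empty 0
    (by intro x; simp [PySem.Dict.getD_empty]) (by simp)
  simp only [List.nil_append] at hc1 hc2
  have hmain := pv_main_loop (pvTemp numbers k) k c hk n.toNat 0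
    ((win (pvTemp numbers k) k.toNat 0).foldl bInit (PySem.Dict.empty, 0)).1
    ((win (pvTemp numbers k) k.toNat 0).foldl bInit (PySem.Dict.empty, 0)).2
    0 hc1 hc2
  have e : ((n.toNat : Nat) : Int) = n := Int.toNat_of_nonneg (by omega)
  simp only [Nat.cast_zero, zero_add, e] at hmain
  exact hmain.symm

lemma pv_count_eq_zero (numbers : List Int) (k n c : Int) (hn : n ≤ 0) :
    count numbers k n c = count_alt numbers k n c := by
  rw [pv_countA_fold, PySem.List.pyRange_one_eq_nil hn]
  unfold count_alt
  rw [if_pos hn]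
  rfl

lemma pv_clampIdx_eval (m : Nat) (z : Int) :
    ((PySem.List.clampIdx m z : Nat) : Int)
      = if z < 0 then (if (m : Int) + z < 0 then 0 else (m : Int) + z) else min z m := by
  simp only [PySem.List.clampIdx]
  split_ifs <;> omega

lemma pv_slice_subset_take (xs : List Int) (a b : Int) :
    ∀ x ∈ PySem.List.slice xs (some a) (some b),
      x ∈ xs.take (PySem.List.clampIdx xs.length b) := by
  intro x hx
  simp only [PySem.List.slice] at hx
  by_cases hab : PySem.List.clampIdx xs.length b ≤ PySem.List.clampIdx xs.length a
  · rw [Nat.sub_eq_zero_of_le hab] at hx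
    simp at hx
  · rw [List.take_drop] at hx
    have e : PySem.List.clampIdx xs.length a
        + (PySem.List.clampIdx xs.length b - PySem.List.clampIdx xs.length a)
        = PySem.List.clampIdx xs.length b := by omega
    rw [e] at hx
    exact List.drop_subset _ _ hx

lemma pv_slice_empty_of_le (xs : List Int) (a b : Int)
    (hab : PySem.List.clampIdx xs.length b ≤ PySem.List.clampIdx xs.length a) :
    PySem.List.slice xs (some a) (some b) = [] := by
  simp only [PySem.List.slice]
  rw [Nat.sub_eq_zero_of_le hab]
  simp

lemma pv_mem_take_mono (l : List Int) {a b : Nat} (h : min a l.length ≤ b) :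
    ∀ x ∈ l.take a, x ∈ l.take b := by
  intro x hx
  rw [List.mem_iff_getElem] at hx ⊢
  obtain ⟨p, hp, rfl⟩ := hx
  have hp' : p < min a l.length := by simpa using hp
  refine ⟨p, by simp; omega, ?_⟩
  rw [List.getElem_take, List.getElem_take]

lemma pv_temp_pos (numbers : List Int) (k : Int) (hk : k < 0)
    (hLk : 0 < (numbers.length : Int) + k) :
    pvTemp numbers k = numbers ++ numbers.take ((numbers.length : Int) + k - 1).toNat := by
  unfold pvTemp
  have e : k - 1 = -(((1 - k).toNat : Nat) : Int) := by omega
  rw [e, PySem.List.slice_to_neg_natCast numbers _ (by omega)]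
  show numbers ++ numbers.take (numbers.length - (1-k).toNat) = numbers ++ numbers.take ((numbers.length : Int) + k - 1).toNat
  have e2 : numbers.length - (1-k).toNat = ((numbers.length : Int) + k - 1).toNat := by omega
  rw [e2]

lemma pv_temp_pos_len (numbers : List Int) (k : Int) (hk : k < 0)
    (hLk : 0 < (numbers.length : Int) + k) :
    ((pvTemp numbers k).length : Int) = 2 * (numbers.length : Int) + k - 1 := by
  rw [pv_temp_pos numbers k hk hLk]
  simp
  omega

lemma pv_val_all_c (w : List Int) (c : Int) (h : ∀ x ∈ w, x = c) :
    (if c ∉ PySem.Set.ofList w then ((PySem.Set.ofList w).length : Int) + 1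
      else ((PySem.Set.ofList w).length : Int)) = 1 := by
  cases w with
  | nil => simp [PySem.Set.ofList]
  | cons a w' =>
    have ha : a = c := h a List.mem_cons_self
    have hc : c ∈ a :: w' := by rw [← ha]; exact List.mem_cons_self
    have hperm : (PySem.Set.ofList (a :: w')).Perm [c] := by
      rw [List.perm_ext_iff_of_nodup (PySem.Set.nodup_ofList _) (List.nodup_singleton c)]
      intro y
      rw [PySem.Set.mem_ofList, List.mem_singleton]
      constructor
      · intro hy; exact h y hy
      · rintro rfl; exact hc
    rw [if_neg (by rw [PySem.Set.mem_ofList]; exact fun hn => hn hc), hperm.length_eq]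
    rfl

lemma pv_val_ge_two (w : List Int) (c x : Int) (hx : x ∈ w) (hne : x ≠ c) :
    2 ≤ (if c ∉ PySem.Set.ofList w then ((PySem.Set.ofList w).length : Int) + 1
      else ((PySem.Set.ofList w).length : Int)) := by
  have hxs : x ∈ PySem.Set.ofList w := (PySem.Set.mem_ofList w x).mpr hx
  by_cases hc : c ∈ PySem.Set.ofList w
  · rw [if_neg (by simpa using hc)]
    have hnd := PySem.Set.nodup_ofList w
    have hsub : ({x, c} : Finset Int) ⊆ (PySem.Set.ofList w).toFinset := by
      intro y hy
      rcases Finset.mem_insert.mp hy with rfl | hy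
      · exact List.mem_toFinset.mpr hxs
      · rw [Finset.mem_singleton] at hy; subst hy; exact List.mem_toFinset.mpr hc
    have h2 : 2 ≤ (PySem.Set.ofList w).toFinset.card := by
      have := Finset.card_le_card hsub
      rwa [Finset.card_pair hne] at this
    rw [List.toFinset_card_of_nodup hnd] at h2
    exact_mod_cast h2
  · rw [if_pos hc]
    have := List.length_pos_of_mem hxs
    omega

-- every element of temp's reachable prefix equals c, given the numbers-prefix hypothesis
lemma pv_temp_prefix_all_c (numbers : List Int) (k n c : Int) (hk : k < 0) (hn : 0 < n)
    (hLk : 0 < (numbers.length : Int) + k) (P : Nat)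
    (hP : (P : Int) ≤ 2 * (numbers.length : Int) + 2 * k - 2 + min n (-k))
    (hall : ∀ x ∈ numbers.take (pvQ numbers k n), x = c) :
    ∀ x ∈ (pvTemp numbers k).take P, x = c := by
  intro x hx
  rw [pv_temp_pos numbers k hk hLk, List.take_append] at hx
  rcases List.mem_append.mp hx with hx1 | hx2
  · apply hall
    apply pv_mem_take_mono numbers _ x hx1
    unfold pvQ
    omega
  · have hx2' : x ∈ numbers.take ((numbers.length : Int) + k - 1).toNat :=
      List.take_subset _ _ hx2
    apply hall
    apply pv_mem_take_mono numbers _ x hx2'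
    unfold pvQ
    omega

lemma pv_A_one (numbers : List Int) (k n c : Int) (hk : k < 0) (hn : 0 < n)
    (hLk : 0 < (numbers.length : Int) + k)
    (hall : ∀ x ∈ numbers.take (pvQ numbers k n), x = c) :
    count numbers k n c = 1 := by
  have hlen : ((pvTemp numbers k).length : Int) = 2 * (numbers.length : Int) + k - 1 :=
    pv_temp_pos_len numbers k hk hLk
  have step : count numbers k n c
      = (PySem.List.pyRange 0 n 1).foldl (fun (a : Int) (_ : Int) => max a 1) 0 := by
    rw [pv_countA_fold]
    apply PySem.List.foldl_congr_mem
    intro acc i hi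
    obtain ⟨hi0, hin⟩ := PySem.List.mem_pyRange_one.mp hi
    have hval : bigval numbers k c i = 1 := by
      unfold bigval
      by_cases hik : i + k < 0
      · apply pv_val_all_c
        intro x hx
        have hx' := pv_slice_subset_take (pvTemp numbers k) i (i + k) x hx
        have hcl := pv_clampIdx_eval (pvTemp numbers k).length (i + k)
        rw [if_pos hik] at hcl
        apply pv_temp_prefix_all_c numbers k n c hk hn hLk
          (PySem.List.clampIdx (pvTemp numbers k).length (i + k)) (by omega) hall
        exact hx'
      · rw [pv_slice_empty_of_le (pvTemp numbers k) i (i + k) (by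
          have h1 := pv_clampIdx_eval (pvTemp numbers k).length (i + k)
          have h2 := pv_clampIdx_eval (pvTemp numbers k).length i
          rw [if_neg hik] at h1
          rw [if_neg (by omega)] at h2
          omega)]
        apply pv_val_all_c
        intro x hx
        simp at hx
    rw [hval]
  rw [step, PySem.List.pyRange_one_cons hn, List.foldl_cons, pv_fold_max_aux]
  simp

lemma pv_A_ge_two (numbers : List Int) (k n c : Int) (hk : k < 0) (hn : 0 < n)
    (hLk : 0 < (numbers.length : Int) + k)
    (hex : ∃ x ∈ numbers.take (pvQ numbers k n), x ≠ c) :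
    2 ≤ count numbers k n c := by
  obtain ⟨x, hxmem, hxne⟩ := hex
  obtain ⟨p, hp, hpx⟩ := List.getElem_of_mem hxmem
  have hp' : p < min (pvQ numbers k n) numbers.length := by simpa using hp
  rw [List.getElem_take] at hpx
  have hlen : ((pvTemp numbers k).length : Int) = 2 * (numbers.length : Int) + k - 1 :=
    pv_temp_pos_len numbers k hk hLk
  have hQ : ((pvQ numbers k n : Nat) : Int)
      = max 0 (2 * (numbers.length : Int) + 2 * k - 2 + min n (-k)) := by
    unfold pvQ; omega
  set m : Int := ((pvTemp numbers k).length : Int) with hm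
  set i0 : Int := max 0 ((p : Int) - (m + k) + 1) with hi0
  have hi0nn : 0 ≤ i0 := by omega
  have hi0n : i0 < n := by omega
  have hi0k : i0 + k < 0 := by omega
  have hi0p : i0 ≤ (p : Int) := by omega
  have hpb : (p : Int) < m + i0 + k := by omega
  have hplen : (p : Int) < m := by omega
  have ha : ((PySem.List.clampIdx (pvTemp numbers k).length i0 : Nat) : Int) = i0 := by
    have h2 := pv_clampIdx_eval (pvTemp numbers k).length i0
    rw [if_neg (by omega)] at h2
    omega
  have hb : ((PySem.List.clampIdx (pvTemp numbers k).length (i0 + k) : Nat) : Int)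
      = m + i0 + k := by
    have h1 := pv_clampIdx_eval (pvTemp numbers k).length (i0 + k)
    rw [if_pos hi0k] at h1
    omega
  have hxw : x ∈ PySem.List.slice (pvTemp numbers k) (some i0) (some (i0 + k)) := by
    simp only [PySem.List.slice]
    set a' := PySem.List.clampIdx (pvTemp numbers k).length i0 with ha'
    set b' := PySem.List.clampIdx (pvTemp numbers k).length (i0 + k) with hb'
    rw [List.mem_iff_getElem]
    refine ⟨p - a', by simp; omega, ?_⟩
    rw [List.getElem_take, List.getElem_drop]
    have e : a' + (p - a') = p := by omega
    simp only [e]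
    rw [List.getElem_of_eq (pv_temp_pos numbers k hk hLk),
      List.getElem_append_left (show p < numbers.length by omega)]
    exact hpx
  have h2 : 2 ≤ bigval numbers k c i0 := pv_val_ge_two _ c x hxw hxne
  rw [pv_countA_fold]
  have hle := (PySem.List.le_foldl_max_int (PySem.List.pyRange 0 n 1)
    (bigval numbers k c) 0).2 i0 (PySem.List.mem_pyRange_one.mpr ⟨hi0nn, hi0n⟩)
  exact le_trans h2 hle

lemma pv_count_eq (numbers : List Int) (k n c : Int) (hD : ¬ D_count numbers k n c) :
    count numbers k n c = count_alt numbers k n c := by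
  by_cases hn : n ≤ 0
  · exact pv_count_eq_zero numbers k n c hn
  · by_cases hk0 : k ≤ 0
    · have hB : count_alt numbers k n c = 1 := by
        unfold count_alt
        rw [if_neg hn, if_pos hk0]
      by_cases hLk : k < 0 ∧ 0 < (numbers.length : Int) + k
      · have hall : ∀ x ∈ numbers.take (pvQ numbers k n), x = c := by
          intro x hx
          by_contra hxc
          exact hD ⟨by omega, hLk.2, x, by rw [← pvQ]; exact hx, hxc⟩
        rw [pv_A_one numbers k n c hLk.1 (by omega) hLk.2 hall, hB]
      · have hL : k < 0 → (numbers.length : Int) + k ≤ 0 := by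
          intro hkneg
          by_contra hpos
          exact hLk ⟨hkneg, by omega⟩
        rw [pv_countA_one numbers k n c (by omega) hk0 hL, hB]
    · exact pv_count_eq_main numbers k n c (by omega) (by omega)

-- ===== VERDICT (by name: the statement is the Claim_ definition above) =====
theorem count_spec : Claim_unchanged_count := by
  intro numbers k n c _ hD
  exact pv_count_eq numbers k n c hD

theorem count_changed : Claim_changed_count := by
  unfold Claim_changed_count; decide

theorem count_tight : Claim_exact_count := by
  intro numbers k n c _ hD
  obtain ⟨hmin, hLk, hex⟩ := hD
  have hA := pv_A_ge_two numbers k n c (by omega) (by omega) hLk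
    (by rw [pvQ]; exact hex)
  have hB : count_alt numbers k n c = 1 := by
    unfold count_alt
    rw [if_neg (by omega), if_pos (by omega)]
  rw [hB]
  omega
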